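-- pv_equiv track=rewrite | github.com/julian31186/competitive-programming | codechef/ORDDIST.py | solve
-- ===== SOURCE A (Python) =====
-- def solve(n,x,y):
--     for i in range(len(x)):
--         pivot = x[i]
--         xx = []
--         for j in range(len(x)):
--             xx.append((abs(x[j] - pivot),x[j]))
--         xx.sort()
--         yy = [tup[1] for tup in xx]
--         if y == yy: return i + 1
--     return -1
-- ===== SOURCE B (Python) =====
-- def solve(n, x, y):
--     # A pivot's sorted-by-distance list always starts with the pivot itself,
--     # so only pivot == y[0] can ever match: sort once and take x's first index of it.
--     if not x or len(y) != len(x):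
--         return -1
--     p = y[0]
--     yy = [v for _, v in sorted((abs(v - p), v) for v in x)]
--     if yy != y:
--         return -1
--     return x.index(p) + 1
-- ===== Notes on version B (the rewrite author's own statement) =====
-- stated objective: faster
-- what changed: Instead of trying every element as pivot and re-sorting for each (A), B observes that a pivot's distance-sorted list always begins with the pivot itself, so only y[0] can work: it sorts once around y[0] and returns the first index of y[0] in x.
import Mathlib
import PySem

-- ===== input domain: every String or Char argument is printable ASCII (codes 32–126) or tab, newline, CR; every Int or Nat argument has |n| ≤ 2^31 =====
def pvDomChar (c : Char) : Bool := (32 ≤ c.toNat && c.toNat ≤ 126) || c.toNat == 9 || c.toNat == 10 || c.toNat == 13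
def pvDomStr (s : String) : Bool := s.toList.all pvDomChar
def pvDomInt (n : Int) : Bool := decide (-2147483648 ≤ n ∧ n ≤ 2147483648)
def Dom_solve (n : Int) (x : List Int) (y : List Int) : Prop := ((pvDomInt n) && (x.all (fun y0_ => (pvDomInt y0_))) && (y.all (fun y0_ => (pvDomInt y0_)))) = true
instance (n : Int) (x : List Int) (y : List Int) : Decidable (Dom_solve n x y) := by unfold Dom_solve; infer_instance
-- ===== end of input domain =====

-- B replaces A's try-every-pivot O(n^2 log n) scan by one distance-sort around y[0],
-- the only pivot that can match; objective: faster (asymptotic).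

-- ===== PORT A =====
-- the 'for i in range(len(x))' loop with early return, iterating (x[i], i) in order
def solveLoop (x y : List Int) : List (Int × Nat) → Int
  | [] => -1
  | (pivot, i) :: rest =>
    let xx := x.foldl (fun acc v => acc ++ [(|v - pivot|, v)]) []
    let xxs := PySem.List.sorted2 xx Prod.fst Prod.snd
    let yy := xxs.map (fun t => t.2)
    if y = yy then (i : Int) + 1 else solveLoop x y rest

def solve (n : Int) (x : List Int) (y : List Int) : Int :=
  solveLoop x y x.zipIdx

-- ===== PORT B =====
def solve_alt (n : Int) (x : List Int) (y : List Int) : Int :=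
  match x, y with
  | [], _ => -1
  | _ :: _, [] => -1
  | _ :: _, p :: _ =>
    if y.length ≠ x.length then -1
    else
      let yy := (PySem.List.sorted2 (x.map (fun v => (|v - p|, v))) Prod.fst Prod.snd).map (fun t => t.2)
      if yy ≠ y then -1
      else ((PySem.List.index? x p).getD 0 : Int) + 1

-- ===== PRECONDITION & SPEC =====
def Spec_solve (n : Int) (x : List Int) (y : List Int) (out : Int) : Prop := out = solve_alt n x y
instance (n : Int) (x : List Int) (y : List Int) (out : Int) : Decidable (Spec_solve n x y out) := by unfold Spec_solve; infer_instance

-- ===== CLAIM (what is proved, stated in full; the proofs are below) =====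
def Claim_equal_solve : Prop := ∀ (n : Int) (x : List Int) (y : List Int), Dom_solve n x y → Spec_solve n x y (solve n x y)

-- ===== LEMMAS AND PROOFS =====

-- Python sorts the (distance, value) pairs lexicographically: that is sorting by the lex key
lemma sorted2_eq_sorted_lex (xs : List (Int × Int)) :
    PySem.List.sorted2 xs Prod.fst Prod.snd
      = PySem.List.sorted xs (fun t => (toLex t : Lex (Int × Int))) := by
  unfold PySem.List.sorted2 PySem.List.sorted
  simp only [Bool.false_eq_true, if_false]
  congr 1
  funext acc a
  congr 1
  funext u v
  rw [Bool.eq_iff_iff]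
  simp only [Bool.or_eq_true, Bool.and_eq_true, Bool.not_eq_true', decide_eq_true_eq,
    decide_eq_false_iff_not, Prod.Lex.lt_iff, ofLex_toLex]
  omega

-- the y-list the Python computes for a given pivot
def yyOf (x : List Int) (p : Int) : List Int :=
  (PySem.List.sorted (x.map (fun v => (|v - p|, v))) (fun t => (toLex t : Lex (Int × Int)))).map (fun t => t.2)

lemma solveLoop_cons (x y : List Int) (pivot : Int) (i : Nat) (rest : List (Int × Nat)) :
    solveLoop x y ((pivot, i) :: rest)
      = if y = yyOf x pivot then (i : Int) + 1 else solveLoop x y rest := by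
  simp only [solveLoop]
  rw [PySem.List.foldl_append_singleton_eq_map, List.nil_append, sorted2_eq_sorted_lex]
  rfl

lemma length_yyOf (x : List Int) (p : Int) : (yyOf x p).length = x.length := by
  simp [yyOf, PySem.List.length_sorted]

lemma mem_of_mem_yyOf {x : List Int} {p q : Int} (h : q ∈ yyOf x p) : q ∈ x := by
  simp only [yyOf, List.mem_map, PySem.List.mem_sorted] at h
  obtain ⟨t, ht, rfl⟩ := h
  obtain ⟨v, hv, rfl⟩ := ht
  exact hv

lemma head_yyOf {x : List Int} {p : Int} (hp : p ∈ x) : ∃ t, yyOf x p = p :: t := by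
  rcases h : PySem.List.sorted (x.map (fun v => (|v - p|, v)))
      (fun t => (toLex t : Lex (Int × Int))) with _ | ⟨m, t⟩
  · rw [PySem.List.sorted_eq_nil_iff, List.map_eq_nil_iff] at h
    subst h; cases hp
  · have hm : m ∈ x.map (fun v => (|v - p|, v)) := by
      have : m ∈ PySem.List.sorted (x.map (fun v => (|v - p|, v)))
          (fun t => (toLex t : Lex (Int × Int))) := by rw [h]; exact List.mem_cons_self ..
      rwa [PySem.List.mem_sorted] at this
    obtain ⟨u, hu, rfl⟩ := List.mem_map.1 hm
    have hle := PySem.List.key_head_sorted_le (x.map (fun v => (|v - p|, v)))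
      (fun t => (toLex t : Lex (Int × Int))) h (0, p)
      (List.mem_map.2 ⟨p, hp, by simp⟩)
    rw [Prod.Lex.le_iff] at hle
    simp only [ofLex_toLex] at hle
    have hu2 : u = p := by
      rcases hle with h' | ⟨h1, _⟩
      · exact absurd h' (not_lt.2 (abs_nonneg _))
      · have := abs_eq_zero.1 h1; omega
    subst hu2
    refine ⟨t.map (fun t => t.2), ?_⟩
    simp [yyOf, h]

lemma match_iff {x : List Int} {pivot p : Int} (hpivot : pivot ∈ x) (ys : List Int) :
    p :: ys = yyOf x pivot ↔ pivot = p ∧ p :: ys = yyOf x p := by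
  constructor
  · intro h
    obtain ⟨t, ht⟩ := head_yyOf hpivot
    rw [ht] at h
    injection h with h1 h2
    subst h1; subst h2
    exact ⟨rfl, ht.symm⟩
  · rintro ⟨rfl, h⟩; exact h

lemma loop_none (x y : List Int) (l : List (Int × Nat))
    (h : ∀ pr ∈ l, y ≠ yyOf x pr.1) : solveLoop x y l = -1 := by
  induction l with
  | nil => rfl
  | cons pr rest ih =>
    obtain ⟨pivot, i⟩ := pr
    rw [solveLoop_cons, if_neg (h (pivot, i) (List.mem_cons_self ..)), ih]
    exact fun pr hpr => h pr (List.mem_cons_of_mem _ hpr)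

lemma index?_of_mem {t : List Int} {p : Int} (hp : p ∈ t) :
    ∃ k, PySem.List.index? t p = some k := by
  induction t with
  | nil => cases hp
  | cons v t ih =>
    by_cases hv : v = p
    · subst hv; exact ⟨0, PySem.List.index?_cons_self ..⟩
    · have hpt : p ∈ t := by
        rcases List.mem_cons.1 hp with h' | h'
        · exact absurd h'.symm hv
        · exact h'
      obtain ⟨k, hk⟩ := ih hpt
      exact ⟨k + 1, by rw [PySem.List.index?_cons_of_ne t hv, hk]; rfl⟩

lemma loop_idx (x y : List Int) (p : Int)
    (h : ∀ pivot ∈ x, (y = yyOf x pivot ↔ pivot = p)) :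
    ∀ (t : List Int) (n : Nat), (∀ v ∈ t, v ∈ x) → p ∈ t →
      solveLoop x y (t.zipIdx n)
        = (n : Int) + (((PySem.List.index? t p).getD 0 : Nat) : Int) + 1 := by
  intro t
  induction t with
  | nil => intro n _ hp; cases hp
  | cons v t ih =>
    intro n hsub hp
    rw [List.zipIdx_cons, solveLoop_cons]
    by_cases hv : v = p
    · subst hv
      rw [if_pos ((h v (hsub v (List.mem_cons_self ..))).2 rfl), PySem.List.index?_cons_self]
      simp
    · have hpt : p ∈ t := by
        rcases List.mem_cons.1 hp with h' | h'
        · exact absurd h'.symm hv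
        · exact h'
      obtain ⟨k, hk⟩ := index?_of_mem hpt
      rw [if_neg (fun hy => hv ((h v (hsub v (List.mem_cons_self ..))).1 hy)),
        ih (n + 1) (fun u hu => hsub u (List.mem_cons_of_mem _ hu)) hpt,
        PySem.List.index?_cons_of_ne t hv, hk]
      simp only [Option.map_some, Option.getD_some]
      push_cast; ring

lemma solve_alt_cons (n x0 p : Int) (xs ys : List Int) :
    solve_alt n (x0 :: xs) (p :: ys)
      = if (p :: ys).length ≠ (x0 :: xs).length then -1
        else if yyOf (x0 :: xs) p ≠ p :: ys then -1
        else ((PySem.List.index? (x0 :: xs) p).getD 0 : Int) + 1 := by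
  have h0 : solve_alt n (x0 :: xs) (p :: ys)
      = if (p :: ys).length ≠ (x0 :: xs).length then -1
        else if ((PySem.List.sorted2 ((x0 :: xs).map (fun v => (|v - p|, v)))
            Prod.fst Prod.snd).map (fun t => t.2)) ≠ p :: ys then -1
        else ((PySem.List.index? (x0 :: xs) p).getD 0 : Int) + 1 := rfl
  rw [h0, sorted2_eq_sorted_lex]
  rfl

-- ===== VERDICT (by name: the statement is the Claim_ definition above) =====
theorem solve_spec : Claim_equal_solve := by
  intro n x y _
  unfold Spec_solve
  cases x with
  | nil => simp [solve, solve_alt, solveLoop]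
  | cons x0 xs =>
    cases y with
    | nil =>
      show solveLoop _ _ _ = _
      rw [loop_none]
      · rfl
      · intro pr _ hy
        have := length_yyOf (x0 :: xs) pr.1
        rw [← hy] at this
        simp at this
    | cons p ys =>
      show solveLoop _ _ _ = _
      by_cases hmatch : yyOf (x0 :: xs) p = p :: ys
      · have hlen : (p :: ys).length = (x0 :: xs).length := by
          rw [← hmatch, length_yyOf]
        have hpmem : p ∈ (x0 :: xs) :=
          mem_of_mem_yyOf (p := p) (hmatch ▸ List.mem_cons_self ..)
        have hiff : ∀ pivot ∈ (x0 :: xs), (p :: ys = yyOf (x0 :: xs) pivot ↔ pivot = p) := by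
          intro pivot hpiv
          constructor
          · intro hy; exact ((match_iff hpiv ys).1 hy).1
          · rintro rfl; exact hmatch.symm
        rw [loop_idx (x0 :: xs) (p :: ys) p hiff (x0 :: xs) 0 (fun v hv => hv) hpmem]
        show _ = solve_alt n (x0 :: xs) (p :: ys)
        rw [solve_alt_cons, if_neg (by simp [hlen]), hmatch, if_neg (by simp)]
        push_cast; ring
      · rw [loop_none]
        · show (-1 : Int) = solve_alt n (x0 :: xs) (p :: ys)
          rw [solve_alt_cons]
          by_cases hlen : (p :: ys).length = (x0 :: xs).length
          · rw [if_neg (by simp [hlen]), if_pos hmatch]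
          · rw [if_pos (by simpa using hlen)]
        · intro pr hpr hy
          have hpiv : pr.1 ∈ (x0 :: xs) := List.fst_mem_of_mem_zipIdx hpr
          obtain ⟨rfl, h2⟩ := (match_iff hpiv ys).1 hy
          exact hmatch h2.symm
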